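-- pv_equiv track=rewrite | github.com/robbie-wasabi/qazy | qazy/config.py | strip_jsonc_comments
-- ===== SOURCE A (Python) =====
-- def strip_jsonc_comments(value: str) -> str:
--     result: list[str] = []
--     index = 0
--     in_string = False
--     escaped = False
--     length = len(value)
--
--     while index < length:
--         char = value[index]
--         next_char = value[index + 1] if index + 1 < length else ""
--
--         if in_string:
--             result.append(char)
--             if escaped:
--                 escaped = False
--             elif char == "\\":
--                 escaped = True
--             elif char == '"':
--                 in_string = False
--             index += 1
--             continue
--
--         if char == '"':
--             in_string = True
--             result.append(char)
--             index += 1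
--             continue
--
--         if char == "/" and next_char == "/":
--             result.extend((" ", " "))
--             index += 2
--             while index < length and value[index] not in "\r\n":
--                 result.append(" ")
--                 index += 1
--             continue
--
--         if char == "/" and next_char == "*":
--             result.extend((" ", " "))
--             index += 2
--             while index < length:
--                 if value[index] == "*" and index + 1 < length and value[index + 1] == "/":
--                     result.extend((" ", " "))
--                     index += 2
--                     break
--                 result.append(value[index] if value[index] in "\r\n" else " ")
--                 index += 1
--             continue
--
--         result.append(char)
--         index += 1
--
--     return "".join(result)
-- ===== SOURCE B (Python) =====
-- NORMAL, IN_STRING, STRING_ESCAPE, SAW_SLASH, LINE_COMMENT, BLOCK_COMMENT, BLOCK_STAR = range(7)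
--
--
-- def _step(state, c):
--     """One transition of the state machine: returns (next_state, emitted text)."""
--     if state == NORMAL:
--         if c == '"':
--             return IN_STRING, c
--         if c == "/":
--             return SAW_SLASH, ""
--         return NORMAL, c
--     if state == IN_STRING:
--         if c == "\\":
--             return STRING_ESCAPE, c
--         if c == '"':
--             return NORMAL, c
--         return IN_STRING, c
--     if state == STRING_ESCAPE:
--         return IN_STRING, c
--     if state == SAW_SLASH:
--         if c == "/":
--             return LINE_COMMENT, "  "
--         if c == "*":
--             return BLOCK_COMMENT, "  "
--         if c == '"':
--             return IN_STRING, "/" + c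
--         return NORMAL, "/" + c
--     if state == LINE_COMMENT:
--         if c in "\r\n":
--             return NORMAL, c
--         return LINE_COMMENT, " "
--     if state == BLOCK_COMMENT:
--         if c == "*":
--             return BLOCK_STAR, ""
--         return BLOCK_COMMENT, c if c in "\r\n" else " "
--     # BLOCK_STAR: a '*' is pending inside a block comment
--     if c == "/":
--         return NORMAL, "  "
--     if c == "*":
--         return BLOCK_STAR, " "
--     return BLOCK_COMMENT, " " + (c if c in "\r\n" else " ")
--
--
-- def strip_jsonc_comments(value: str) -> str:
--     state = NORMAL
--     out = []
--     for c in value: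
--         state, emitted = _step(state, c)
--         out.append(emitted)
--     if state == SAW_SLASH:
--         out.append("/")
--     elif state == BLOCK_STAR:
--         out.append(" ")
--     return "".join(out)
-- ===== Notes on version B (the rewrite author's own statement) =====
-- stated objective: alternative
-- what changed: Replaced A's outer scan with nested comment-consuming inner while-loops and per-position lookahead by a flat one-character-per-step finite state machine (7 explicit states incl. SAW_SLASH/BLOCK_STAR pending states flushed at EOF) driven by a single transition function.
import Mathlib
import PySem

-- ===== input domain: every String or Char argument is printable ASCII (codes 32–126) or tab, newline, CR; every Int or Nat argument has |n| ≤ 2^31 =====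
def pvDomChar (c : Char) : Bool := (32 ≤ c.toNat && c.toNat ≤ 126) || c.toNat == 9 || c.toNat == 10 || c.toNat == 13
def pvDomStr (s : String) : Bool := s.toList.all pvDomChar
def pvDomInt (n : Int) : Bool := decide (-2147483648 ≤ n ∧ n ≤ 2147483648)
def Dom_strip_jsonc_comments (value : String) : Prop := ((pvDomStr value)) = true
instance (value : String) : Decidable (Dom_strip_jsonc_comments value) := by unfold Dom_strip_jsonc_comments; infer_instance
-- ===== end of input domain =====

-- B replaces A's outer scan with nested comment-consuming inner while-loops and lookahead by a
-- flat one-character-per-step explicit-state machine (alternative decomposition; same O(n) cost).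

-- ===== PORT A =====
-- A's `while index < length and value[index] not in "\r\n"` line-comment loop:
-- returns the appended spaces and the remaining input (A leaves the terminator in place).
def lineLoop : List Char → List Char × List Char
  | [] => ([], [])
  | c :: rest =>
      if c = '\r' ∨ c = '\n' then ([], c :: rest)
      else
        let p := lineLoop rest
        (' ' :: p.1, p.2)

-- A's block-comment loop: spaces (newlines kept) until `*/` (two spaces) or end of input.
def blockLoop : List Char → List Char × List Char
  | [] => ([], [])
  | c :: rest =>
      if c = '*' ∧ rest.head? = some '/' then ([' ', ' '], rest.tail)
      else
        let p := blockLoop rest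
        ((if c = '\r' ∨ c = '\n' then c else ' ') :: p.1, p.2)

-- A's outer while-loop; `fuel` (initially `len(value)`) is only a structural totality guard:
-- the list argument shrinks at every call and never exceeds the fuel.
def aMain : Nat → List Char → Bool → Bool → List Char
  | 0, _, _, _ => []
  | _ + 1, [], _, _ => []
  | f + 1, c :: rest, inStr, esc =>
      if inStr then
        c :: (if esc then aMain f rest true false
              else if c = '\\' then aMain f rest true true
              else if c = '"' then aMain f rest false false
              else aMain f rest true false)
      else if c = '"' then
        c :: aMain f rest true false
      else if c = '/' ∧ rest.head? = some '/' then
        let p := lineLoop rest.tail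
        ' ' :: ' ' :: (p.1 ++ aMain f p.2 false false)
      else if c = '/' ∧ rest.head? = some '*' then
        let p := blockLoop rest.tail
        ' ' :: ' ' :: (p.1 ++ aMain f p.2 false false)
      else
        c :: aMain f rest false false

def strip_jsonc_comments (value : String) : String :=
  String.mk (aMain value.toList.length value.toList false false)

-- ===== PORT B =====
inductive JSt
  | normal | instr | strEsc | sawSlash | lineC | blockC | blockStar
deriving DecidableEq, Repr

def bStep : JSt → Char → JSt × List Char
  | .normal, c =>
      if c = '"' then (.instr, [c])
      else if c = '/' then (.sawSlash, [])
      else (.normal, [c])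
  | .instr, c =>
      if c = '\\' then (.strEsc, [c])
      else if c = '"' then (.normal, [c])
      else (.instr, [c])
  | .strEsc, c => (.instr, [c])
  | .sawSlash, c =>
      if c = '/' then (.lineC, [' ', ' '])
      else if c = '*' then (.blockC, [' ', ' '])
      else if c = '"' then (.instr, ['/', c])
      else (.normal, ['/', c])
  | .lineC, c =>
      if c = '\r' ∨ c = '\n' then (.normal, [c]) else (.lineC, [' '])
  | .blockC, c =>
      if c = '*' then (.blockStar, [])
      else if c = '\r' ∨ c = '\n' then (.blockC, [c])
      else (.blockC, [' '])
  | .blockStar, c =>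
      if c = '/' then (.normal, [' ', ' '])
      else if c = '*' then (.blockStar, [' '])
      else if c = '\r' ∨ c = '\n' then (.blockC, [' ', c])
      else (.blockC, [' ', ' '])

def bFlush : JSt → List Char
  | .sawSlash => ['/']
  | .blockStar => [' ']
  | _ => []

def bRun : JSt → List Char → List Char
  | st, [] => bFlush st
  | st, c :: cs =>
      let (st', out) := bStep st c
      out ++ bRun st' cs

def strip_jsonc_comments_alt (value : String) : String :=
  String.mk (bRun .normal value.toList)

-- ===== PRECONDITION & SPEC =====
def Spec_strip_jsonc_comments (value : String) (out : String) : Prop := out = strip_jsonc_comments_alt value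
instance (value : String) (out : String) : Decidable (Spec_strip_jsonc_comments value out) := by unfold Spec_strip_jsonc_comments; infer_instance

-- ===== CLAIM (what is proved, stated in full; the proofs are below) =====
def Claim_equal_strip_jsonc_comments : Prop := ∀ (value : String), Dom_strip_jsonc_comments value → Spec_strip_jsonc_comments value (strip_jsonc_comments value)

-- ===== LEMMAS AND PROOFS =====

theorem aMain_nil (f : Nat) (b e : Bool) : aMain f [] b e = [] := by
  cases f <;> simp [aMain]

theorem bRun_slash (x : Char) (xs : List Char) (h1 : x ≠ '/') (h2 : x ≠ '*') :
    bRun .sawSlash (x :: xs) = '/' :: bRun .normal (x :: xs) := by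
  by_cases hq : x = '"' <;> simp [bRun, bStep, h1, h2, hq]

theorem bRun_star (x : Char) (xs : List Char) (h1 : x ≠ '/') :
    bRun .blockStar (x :: xs) = ' ' :: bRun .blockC (x :: xs) := by
  by_cases hs : x = '*'
  · simp [bRun, bStep, h1, hs]
  · by_cases hn : x = '\r' ∨ x = '\n' <;> simp [bRun, bStep, h1, hs, hn]

theorem key (f : Nat) : ∀ (l : List Char), l.length ≤ f →
    (aMain f l false false = bRun .normal l) ∧
    (aMain f l true false = bRun .instr l) ∧
    (aMain f l true true = bRun .strEsc l) := by
  induction f with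
  | zero =>
    intro l hl
    have : l = [] := List.eq_nil_of_length_eq_zero (by omega)
    subst this
    simp [aMain, bRun, bFlush]
  | succ f ih =>
    intro l hl
    match l with
    | [] => simp [aMain, bRun, bFlush]
    | c :: rest =>
      have hr : rest.length ≤ f := by simp at hl; omega
      -- the line-comment loop agrees with B's LINE_COMMENT state
      have hline : ∀ t : List Char, t.length ≤ f →
          (lineLoop t).1 ++ aMain f (lineLoop t).2 false false = bRun .lineC t := by
        intro t
        induction t with
        | nil => intro _; simp [lineLoop, aMain_nil, bRun, bFlush]
        | cons x xs ihx =>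
          intro hlen
          by_cases hn : x = '\r' ∨ x = '\n'
          · have hq : x ≠ '"' := by rcases hn with hn | hn <;> simp [hn]
            have hs : x ≠ '/' := by rcases hn with hn | hn <;> simp [hn]
            have hmx := (ih (x :: xs) hlen).1
            simp only [lineLoop, hn, if_true, List.nil_append]
            rw [hmx]
            simp [bRun, bStep, hn, hq, hs]
          · have hxs : xs.length ≤ f := by simp at hlen; omega
            simp only [lineLoop, hn, if_false]
            simp [bRun, bStep, hn, ihx hxs]
      -- the block-comment loop agrees with B's BLOCK_COMMENT state
      have hblock : ∀ t : List Char, t.length ≤ f →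
          (blockLoop t).1 ++ aMain f (blockLoop t).2 false false = bRun .blockC t := by
        intro t
        induction t with
        | nil => intro _; simp [blockLoop, aMain_nil, bRun, bFlush]
        | cons x xs ihx =>
          intro hlen
          have hxs : xs.length ≤ f := by simp at hlen; omega
          by_cases hc : x = '*' ∧ xs.head? = some '/'
          · obtain ⟨hx, hh⟩ := hc
            subst hx
            rcases xs with _ | ⟨y, t'⟩
            · simp at hh
            · have hy : y = '/' := by simpa using hh
              subst hy
              have ht' : t'.length ≤ f := by simp at hxs; omega
              simp [blockLoop, bRun, bStep, (ih t' ht').1]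
          · by_cases hx : x = '*'
            · subst hx
              rcases xs with _ | ⟨y, ys⟩
              · simp [blockLoop, aMain_nil, bRun, bStep, bFlush]
              · have hy : y ≠ '/' := by
                  intro h; exact hc ⟨rfl, by simp [h]⟩
                rw [show bRun .blockC ('*' :: y :: ys) = bRun .blockStar (y :: ys) by
                      simp [bRun, bStep],
                    bRun_star y ys hy, ← ihx hxs]
                simp [blockLoop, hy]
            · by_cases hn : x = '\r' ∨ x = '\n' <;>
                simp [blockLoop, hc, bRun, bStep, hx, hn, ihx hxs]
      refine ⟨?_, ?_, ?_⟩
      · -- NORMAL state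
        by_cases hq : c = '"'
        · simp [aMain, hq, bRun, bStep, (ih rest hr).2.1]
        · by_cases hs : c = '/'
          · subst hs
            rcases rest with _ | ⟨y, t⟩
            · simp [aMain, hq, aMain_nil, bRun, bStep, bFlush]
            · have ht : t.length ≤ f := by simp at hr; omega
              by_cases hy : y = '/'
              · subst hy
                simp [aMain, bRun, bStep, hline t ht]
              · by_cases hy2 : y = '*'
                · subst hy2
                  simp [aMain, hy, bRun, bStep, hblock t ht]
                · rw [show aMain (f+1) ('/' :: y :: t) false false
                        = '/' :: aMain f (y :: t) false false by
                        simp [aMain, hy, hy2],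
                      (ih (y :: t) hr).1,
                      show bRun .normal ('/' :: y :: t) = bRun .sawSlash (y :: t) by
                        simp [bRun, bStep],
                      bRun_slash y t hy hy2]
          · simp [aMain, hq, hs, bRun, bStep, (ih rest hr).1]
      · -- IN_STRING state
        by_cases hb : c = '\\'
        · simp [aMain, hb, bRun, bStep, (ih rest hr).2.2]
        · by_cases hq : c = '"'
          · simp [aMain, hb, hq, bRun, bStep, (ih rest hr).1]
          · simp [aMain, hb, hq, bRun, bStep, (ih rest hr).2.1]
      · -- STRING_ESCAPE state
        simp [aMain, bRun, bStep, (ih rest hr).2.1]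

-- ===== VERDICT (by name: the statement is the Claim_ definition above) =====
theorem strip_jsonc_comments_spec : Claim_equal_strip_jsonc_comments := by
  intro value _
  unfold Spec_strip_jsonc_comments strip_jsonc_comments strip_jsonc_comments_alt
  rw [(key value.toList.length value.toList (by omega)).1]
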